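-- pv_equiv track=rewrite | github.com/ayushnangia/gen | agril.py | process_generated_dialogue
-- ===== SOURCE A (Python) =====
-- from typing import List, Dict, Tuple
--
-- def process_generated_dialogue(generated_text: str) -> List[Dict]:
--     """
--     Processes the generated dialogue text into a list of turns.
--     """
--     lines = generated_text.split('\n')
--     turns = []
--     current_speaker = None
--     current_utterance = []
--
--     for line in lines:
--         line = line.strip()
--         if line.startswith("USER:") or line.startswith("ASSISTANT:"):
--             if current_speaker and current_utterance:
--                 turns.append({
--                     "speaker": current_speaker,
--                     "utterance": " ".join(current_utterance).strip()
--                 })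
--             current_speaker = "USER" if line.startswith("USER:") else "ASSISTANT"
--             current_utterance = [line.split(":", 1)[1].strip()]
--         elif line:
--             current_utterance.append(line)
--
--     if current_speaker and current_utterance:
--         turns.append({
--             "speaker": current_speaker,
--             "utterance": " ".join(current_utterance).strip()
--         })
--
--     return turns
-- ===== SOURCE B (Python) =====
-- def process_generated_dialogue(generated_text):
--     # Two-phase: group stripped lines into blocks starting at each speaker marker, then map each block to a turn.
--     stripped = [ln.strip() for ln in generated_text.split('\n')]
--     blocks = []
--     for ln in stripped:
--         if ln.startswith("USER:") or ln.startswith("ASSISTANT:"):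
--             blocks.append([ln])
--         elif blocks and ln:
--             blocks[-1].append(ln)
--     return [
--         {"speaker": "USER" if b[0].startswith("USER:") else "ASSISTANT",
--          "utterance": " ".join([b[0].split(":", 1)[1].strip()] + b[1:]).strip()}
--         for b in blocks
--     ]
-- ===== Notes on version B (the rewrite author's own statement) =====
-- stated objective: idiomatic
-- what changed: Replaces the per-line state machine (pending speaker/utterance accumulators flushed at each marker and at EOF) by a two-phase pipeline: group stripped lines into blocks that start at each speaker marker, then map each block to its turn dict.
import Mathlib
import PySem

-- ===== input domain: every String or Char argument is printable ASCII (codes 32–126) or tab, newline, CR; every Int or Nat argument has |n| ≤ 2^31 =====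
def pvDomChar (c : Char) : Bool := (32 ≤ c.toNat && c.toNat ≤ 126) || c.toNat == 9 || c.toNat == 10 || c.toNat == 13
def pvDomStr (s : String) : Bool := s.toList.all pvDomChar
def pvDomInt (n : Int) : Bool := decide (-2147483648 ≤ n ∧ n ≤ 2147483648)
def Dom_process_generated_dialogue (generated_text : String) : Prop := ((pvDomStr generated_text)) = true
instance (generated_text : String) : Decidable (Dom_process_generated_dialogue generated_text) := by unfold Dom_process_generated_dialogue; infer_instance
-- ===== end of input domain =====

-- B replaces A's per-line state machine by a two-phase "group lines into marker-started blocks, then map each block to a turn" pipeline (idiomatic; same cost).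


-- ===== PORT A =====
-- shared small expressions both Pythons contain verbatim:
-- line.split(":", 1)[1].strip()  (only evaluated on lines that contain ':', so the defaults are unreachable)
def pvContent (line : String) : String :=
  PySem.Str.strip (((PySem.Str.splitMax? line ":" 1).getD []).getD 1 "")

-- line.startswith("USER:") or line.startswith("ASSISTANT:")
def pvIsMarker (line : String) : Bool :=
  PySem.Str.startswith line "USER:" || PySem.Str.startswith line "ASSISTANT:"

-- A's duplicated flush block: append {"speaker":…, "utterance": " ".join(utt).strip()} if speaker and utterance
def pvFlush (turns : List (List (String × String))) (spk : Option String) (utt : List String) :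
    List (List (String × String)) :=
  match spk with
  | none => turns
  | some s =>
      if utt = [] then turns
      else turns ++ [[("speaker", s), ("utterance", PySem.Str.strip (PySem.Str.join " " utt))]]

-- the for-loop of A, as structural recursion over the lines with the same state
def pvALoop (lines : List String) (turns : List (List (String × String)))
    (spk : Option String) (utt : List String) : List (List (String × String)) :=
  match lines with
  | [] => pvFlush turns spk utt
  | l :: rest =>
      let line := PySem.Str.strip l
      if pvIsMarker line then
        pvALoop rest (pvFlush turns spk utt)
          (some (if PySem.Str.startswith line "USER:" then "USER" else "ASSISTANT"))
          [pvContent line]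
      else if line = "" then pvALoop rest turns spk utt
      else pvALoop rest turns spk (utt ++ [line])

def process_generated_dialogue (generated_text : String) : List (List (String × String)) :=
  pvALoop ((PySem.Str.split? generated_text "\n").getD []) [] none []

-- ===== PORT B =====
-- the grouping loop of Source B: start a new block at a marker, else append to the last block
def pvBlocksStep (blocks : List (List String)) (ln : String) : List (List String) :=
  if pvIsMarker ln then blocks ++ [[ln]]
  else if blocks ≠ [] ∧ ln ≠ "" then blocks.dropLast ++ [blocks.getLastD [] ++ [ln]]
  else blocks

-- one block -> one turn dict
def pvRender (b : List String) : List (String × String) :=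
  [("speaker", if PySem.Str.startswith (b.headD "") "USER:" then "USER" else "ASSISTANT"),
   ("utterance", PySem.Str.strip (PySem.Str.join " " (pvContent (b.headD "") :: b.tail)))]

def process_generated_dialogue_alt (generated_text : String) : List (List (String × String)) :=
  ((((PySem.Str.split? generated_text "\n").getD []).map PySem.Str.strip).foldl pvBlocksStep []).map pvRender

-- ===== PRECONDITION & SPEC =====
def Spec_process_generated_dialogue (generated_text : String) (out : List (List (String × String))) : Prop := out = process_generated_dialogue_alt generated_text
instance (generated_text : String) (out : List (List (String × String))) : Decidable (Spec_process_generated_dialogue generated_text out) := by unfold Spec_process_generated_dialogue; infer_instance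

-- ===== CLAIM (what is proved, stated in full; the proofs are below) =====
def Claim_equal_process_generated_dialogue : Prop := ∀ (generated_text : String), Dom_process_generated_dialogue generated_text → Spec_process_generated_dialogue generated_text (process_generated_dialogue generated_text)

-- ===== LEMMAS AND PROOFS =====

-- Invariant once a block is open: A's state (turns, speaker, utterance) is exactly the rendered
-- finished blocks plus the speaker/parts of the current block (h :: t), h a marker line.
theorem pv_main (lines : List String) (init : List (List String)) (h : String) (t : List String) :
    pvALoop lines (init.map pvRender)
      (some (if PySem.Str.startswith h "USER:" then "USER" else "ASSISTANT"))
      (pvContent h :: t)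
    = ((lines.map PySem.Str.strip).foldl pvBlocksStep (init ++ [h :: t])).map pvRender := by
  induction lines generalizing init h t with
  | nil =>
      simp [pvALoop, pvFlush, pvRender]
  | cons l rest ih =>
      simp only [pvALoop, List.map_cons, List.foldl_cons]
      by_cases hm : pvIsMarker (PySem.Str.strip l) = true
      · rw [if_pos hm]
        have hflush : pvFlush (init.map pvRender)
            (some (if PySem.Str.startswith h "USER:" then "USER" else "ASSISTANT"))
            (pvContent h :: t) = ((init ++ [h :: t]).map pvRender) := by
          simp [pvFlush, pvRender]
        rw [hflush]
        have := ih (init ++ [h :: t]) (PySem.Str.strip l) []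
        simpa [pvBlocksStep, hm] using this
      · rw [if_neg hm]
        by_cases he : PySem.Str.strip l = ""
        · rw [if_pos he]
          simpa [pvBlocksStep, hm, he] using ih init h t
        · rw [if_neg he]
          have := ih init h (t ++ [PySem.Str.strip l])
          simpa [pvBlocksStep, hm, he, List.dropLast_concat, List.getLastD_concat] using this

-- Before the first marker: A discards everything, B has no blocks.
theorem pv_pre (lines : List String) (junk : List String) :
    pvALoop lines [] none junk
    = ((lines.map PySem.Str.strip).foldl pvBlocksStep []).map pvRender := by
  induction lines generalizing junk with
  | nil => simp [pvALoop, pvFlush]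
  | cons l rest ih =>
      simp only [pvALoop, List.map_cons, List.foldl_cons]
      by_cases hm : pvIsMarker (PySem.Str.strip l) = true
      · rw [if_pos hm]
        have := pv_main rest [] (PySem.Str.strip l) []
        simpa [pvFlush, pvBlocksStep, hm] using this
      · rw [if_neg hm]
        by_cases he : PySem.Str.strip l = ""
        · rw [if_pos he]; simpa [pvBlocksStep, hm, he] using ih junk
        · rw [if_neg he]; simpa [pvBlocksStep, hm, he] using ih (junk ++ [PySem.Str.strip l])

-- ===== VERDICT (by name: the statement is the Claim_ definition above) =====
theorem process_generated_dialogue_spec : Claim_equal_process_generated_dialogue := by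
  intro t _
  unfold Spec_process_generated_dialogue process_generated_dialogue process_generated_dialogue_alt
  exact pv_pre _ []
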